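-- pv_equiv track=rewrite | github.com/smsxgz/euler_project | problems/problem_357/Prime_generating_integers.py | factor_generator
-- ===== SOURCE A (Python) =====
-- def factor_generator(fs):
--     if len(fs) == 0:
--         yield 1
--         return
--
--     p = fs[0]
--     for m in factor_generator(fs[1:]):
--         yield m
--         yield p * m
--
--     return
-- ===== SOURCE B (Python) =====
-- def factor_generator(fs):
--     result = [1]
--     for p in reversed(fs):
--         result = [x for m in result for x in (m, p * m)]
--     yield from result
-- ===== Notes on version B (the rewrite author's own statement) =====
-- stated objective: alternative
-- what changed: Replaced the recursive generator (recurse on fs[1:], interleave m and p*m) by an iterative list-doubling loop over reversed(fs) that yields the finished list once.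
import Mathlib
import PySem

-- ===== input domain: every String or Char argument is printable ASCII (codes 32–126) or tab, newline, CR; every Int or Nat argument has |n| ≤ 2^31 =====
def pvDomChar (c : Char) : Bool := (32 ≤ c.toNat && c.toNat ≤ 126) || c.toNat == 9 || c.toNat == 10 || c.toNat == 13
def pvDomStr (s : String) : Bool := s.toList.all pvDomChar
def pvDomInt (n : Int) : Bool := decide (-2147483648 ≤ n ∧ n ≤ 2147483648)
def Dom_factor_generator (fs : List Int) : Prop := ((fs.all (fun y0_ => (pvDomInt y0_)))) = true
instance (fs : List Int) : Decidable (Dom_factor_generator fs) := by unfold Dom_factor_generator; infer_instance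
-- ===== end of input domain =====

-- B replaces A's recursive generator by an iterative doubling loop over reversed(fs); same outputs in the same order.
-- ===== PORT A =====
def factor_generator (fs : List Int) : List Int :=
  match fs with
  | [] => [1]
  | p :: rest => (factor_generator rest).flatMap (fun m => [m, p * m])

-- ===== PORT B =====
def factor_generator_alt (fs : List Int) : List Int :=
  fs.reverse.foldl (fun result p => result.flatMap (fun m => [m, p * m])) [1]

-- ===== PRECONDITION & SPEC =====
def Spec_factor_generator (fs : List Int) (out : List Int) : Prop := out = factor_generator_alt fs
instance (fs : List Int) (out : List Int) : Decidable (Spec_factor_generator fs out) := by unfold Spec_factor_generator; infer_instance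

-- ===== CLAIM (what is proved, stated in full; the proofs are below) =====
def Claim_equal_factor_generator : Prop := ∀ (fs : List Int), Dom_factor_generator fs → Spec_factor_generator fs (factor_generator fs)

-- ===== LEMMAS AND PROOFS =====

-- ===== VERDICT (by name: the statement is the Claim_ definition above) =====
theorem factor_generator_alt_cons (p : Int) (rest : List Int) :
    factor_generator_alt (p :: rest) = (factor_generator_alt rest).flatMap (fun m => [m, p * m]) := by
  simp [factor_generator_alt, List.foldl_append]

theorem factor_generator_eq_alt (fs : List Int) :
    factor_generator fs = factor_generator_alt fs := by
  induction fs with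
  | nil => rfl
  | cons p rest ih =>
      simp [factor_generator, factor_generator_alt_cons, ih]

theorem factor_generator_spec : Claim_equal_factor_generator := by
  intro fs _
  exact factor_generator_eq_alt fs
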